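-- pv_equiv track=rewrite | github.com/RoyalFireStorm/CelesTAS | functions.py | parsedStatuses
-- ===== SOURCE A (Python) =====
-- def parsedStatuses(inputs):
--     sol = [0] * 8
--
--     for status in inputs:
--         if(status == 'Wall-R'):
--             sol[0] = 1
--         if(status == 'Wall-L'):
--             sol[1] = 1
--         if(status == 'CanDash'):
--             sol[2] = 1
--         if(status == 'Ground'):
--             sol[3] = 1
--         if(status == 'Dead'):
--             sol[4] = 1
--         if(status == 'Coyote'):
--             sol[5] = 1
--         if(status == 'NoControl'):
--             sol[6] = 1
--         if(status == 'Frozen'):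
--             sol[7] = 1
--     return sol
-- ===== SOURCE B (Python) =====
-- def parsedStatuses(inputs):
--     present = set(inputs)
--     names = ['Wall-R', 'Wall-L', 'CanDash', 'Ground', 'Dead', 'Coyote', 'NoControl', 'Frozen']
--     return [1 if name in present else 0 for name in names]
-- ===== Notes on version B (the rewrite author's own statement) =====
-- stated objective: idiomatic
-- what changed: Instead of looping over the inputs and setting flag slots with eight per-element if-statements, B builds a set of the inputs once and constructs the result by a comprehension over the fixed ordered list of the eight status names, testing set membership.
import Mathlib
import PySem

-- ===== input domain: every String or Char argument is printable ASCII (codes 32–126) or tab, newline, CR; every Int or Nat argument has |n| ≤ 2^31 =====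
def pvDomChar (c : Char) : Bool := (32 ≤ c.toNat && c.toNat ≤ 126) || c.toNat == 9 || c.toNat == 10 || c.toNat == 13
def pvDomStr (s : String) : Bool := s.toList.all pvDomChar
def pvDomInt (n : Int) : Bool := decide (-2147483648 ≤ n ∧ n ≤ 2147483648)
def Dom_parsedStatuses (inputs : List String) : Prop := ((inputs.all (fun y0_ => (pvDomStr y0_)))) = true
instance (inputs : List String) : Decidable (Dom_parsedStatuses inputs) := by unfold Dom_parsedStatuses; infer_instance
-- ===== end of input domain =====

-- B builds a set of the inputs once and maps membership over the fixed list of the eight status names (idiomatic restructuring; same cost).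
-- ===== PORT A =====
def pvStepA (sol : List Int) (status : String) : List Int :=
  let sol := if status == "Wall-R" then PySem.List.pySetD sol 0 1 else sol
  let sol := if status == "Wall-L" then PySem.List.pySetD sol 1 1 else sol
  let sol := if status == "CanDash" then PySem.List.pySetD sol 2 1 else sol
  let sol := if status == "Ground" then PySem.List.pySetD sol 3 1 else sol
  let sol := if status == "Dead" then PySem.List.pySetD sol 4 1 else sol
  let sol := if status == "Coyote" then PySem.List.pySetD sol 5 1 else sol
  let sol := if status == "NoControl" then PySem.List.pySetD sol 6 1 else sol
  let sol := if status == "Frozen" then PySem.List.pySetD sol 7 1 else sol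
  sol

def parsedStatuses (inputs : List String) : List Int :=
  inputs.foldl pvStepA [0, 0, 0, 0, 0, 0, 0, 0]

-- ===== PORT B =====
def pvNames : List String :=
  ["Wall-R", "Wall-L", "CanDash", "Ground", "Dead", "Coyote", "NoControl", "Frozen"]

def parsedStatuses_alt (inputs : List String) : List Int :=
  let present : PySem.Set String := PySem.Set.ofList inputs
  pvNames.map (fun name => if PySem.Set.contains present name then (1 : Int) else 0)

-- ===== PRECONDITION & SPEC =====
def Spec_parsedStatuses (inputs : List String) (out : List Int) : Prop := out = parsedStatuses_alt inputs
instance (inputs : List String) (out : List Int) : Decidable (Spec_parsedStatuses inputs out) := by unfold Spec_parsedStatuses; infer_instance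

-- ===== CLAIM (what is proved, stated in full; the proofs are below) =====
def Claim_equal_parsedStatuses : Prop := ∀ (inputs : List String), Dom_parsedStatuses inputs → Spec_parsedStatuses inputs (parsedStatuses inputs)

-- ===== LEMMAS AND PROOFS =====

-- ===== VERDICT (by name: the statement is the Claim_ definition above) =====
-- A's per-element step, evaluated on an explicit 8-slot state.
theorem pv_step (x : String) (a b c d e f g h : Int) :
    pvStepA [a, b, c, d, e, f, g, h] x =
      [if x = "Wall-R" then 1 else a, if x = "Wall-L" then 1 else b,
       if x = "CanDash" then 1 else c, if x = "Ground" then 1 else d,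
       if x = "Dead" then 1 else e, if x = "Coyote" then 1 else f,
       if x = "NoControl" then 1 else g, if x = "Frozen" then 1 else h] := by
  by_cases h1 : x = "Wall-R"
  · subst h1; rfl
  by_cases h2 : x = "Wall-L"
  · subst h2; rfl
  by_cases h3 : x = "CanDash"
  · subst h3; rfl
  by_cases h4 : x = "Ground"
  · subst h4; rfl
  by_cases h5 : x = "Dead"
  · subst h5; rfl
  by_cases h6 : x = "Coyote"
  · subst h6; rfl
  by_cases h7 : x = "NoControl"
  · subst h7; rfl
  by_cases h8 : x = "Frozen"
  · subst h8; rfl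
  simp [pvStepA, beq_iff_eq, h1, h2, h3, h4, h5, h6, h7, h8]

theorem pv_ite_mem (n x : String) (xs : List String) (a : Int) :
    (if n = x ∨ n ∈ xs then (1 : Int) else a) =
      (if n ∈ xs then 1 else if x = n then 1 else a) := by
  by_cases h1 : n ∈ xs <;> by_cases h2 : n = x <;> simp_all [eq_comm]

-- Loop invariant: folding A's step over inputs from any 8-slot state sets slot i to 1
-- exactly when the i-th status name occurs in inputs, leaving it unchanged otherwise.
theorem pv_inv (inputs : List String) (a b c d e f g h : Int) :
    inputs.foldl pvStepA [a, b, c, d, e, f, g, h] =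
      [if "Wall-R" ∈ inputs then 1 else a, if "Wall-L" ∈ inputs then 1 else b,
       if "CanDash" ∈ inputs then 1 else c, if "Ground" ∈ inputs then 1 else d,
       if "Dead" ∈ inputs then 1 else e, if "Coyote" ∈ inputs then 1 else f,
       if "NoControl" ∈ inputs then 1 else g, if "Frozen" ∈ inputs then 1 else h] := by
  induction inputs generalizing a b c d e f g h with
  | nil => simp
  | cons x xs ih =>
    rw [List.foldl_cons, pv_step, ih]
    simp only [List.mem_cons, pv_ite_mem]

theorem parsedStatuses_spec : Claim_equal_parsedStatuses := by
  intro inputs _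
  show parsedStatuses inputs = parsedStatuses_alt inputs
  simp [parsedStatuses, parsedStatuses_alt, pvNames, pv_inv,
    PySem.Set.mem_ofList]
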